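-- pv_equiv track=rewrite | github.com/JanL80/cageinator | cage_assemblers/octaeder.py | _is_carboxylate_oxygen
-- ===== SOURCE A (Python) =====
-- def _make_nbrs(atoms, bonds):
--     nbrs = [[] for _ in range(len(atoms))]
--     for b in bonds or []:
--         i, j = int(b["a"]), int(b["b"])
--         nbrs[i].append(j); nbrs[j].append(i)
--     return nbrs
--
-- def _is_carboxylate_oxygen(i, atoms, bonds):
--     if atoms[i]["el"] != "O":
--         return False
--     nbrs = _make_nbrs(atoms, bonds)
--     if any(atoms[j]["el"] == "H" for j in nbrs[i]):                 ### OH excluded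
--         return False
--     cnbrs = [j for j in nbrs[i] if atoms[j]["el"] == "C"]
--     if len(cnbrs) != 1:
--         return False
--     c = cnbrs[0]
--     onbrs = [j for j in nbrs[c] if atoms[j]["el"] == "O"]
--     return len(onbrs) == 2
-- ===== SOURCE B (Python) =====
-- def _is_carboxylate_oxygen(i, atoms, bonds):
--     if atoms[i]["el"] != "O":
--         return False
--     mine = []
--     for b in bonds or []:
--         a, c = int(b["a"]), int(b["b"])
--         if a == i:
--             mine.append(c)
--         if c == i:
--             mine.append(a)
--     if any(atoms[j]["el"] == "H" for j in mine):
--         return False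
--     cn = [j for j in mine if atoms[j]["el"] == "C"]
--     if len(cn) != 1:
--         return False
--     cc = cn[0]
--     oc = 0
--     for b in bonds or []:
--         a, c = int(b["a"]), int(b["b"])
--         if a == cc and atoms[c]["el"] == "O":
--             oc += 1
--         if c == cc and atoms[a]["el"] == "O":
--             oc += 1
--     return oc == 2
-- ===== Notes on version B (the rewrite author's own statement) =====
-- stated objective: simpler
-- what changed: B drops the per-atom adjacency structure (_make_nbrs) entirely: one scan of the bond list collects atom i's neighbour list directly, and a second scan counts the carbon's oxygen neighbours; Pre_ restricts to well-formed molecule tables (atom i carries "el", and when it is an oxygen i and all bond endpoints are nonnegative in-range atom indices carrying "el" with int-parsable "a"/"b"), excluding malformed inputs on which A either raises or depends on Python's negative-index wraparound.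
-- outside the precondition, e.g. on _is_carboxylate_oxygen(-1, [{'el': 'O'}], []): A returns False, B returns False; on _is_carboxylate_oxygen(0, [{'el': 'O'}, {}], [{'a': '1', 'b': '1'}]): A returns False, B returns False
import Mathlib
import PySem

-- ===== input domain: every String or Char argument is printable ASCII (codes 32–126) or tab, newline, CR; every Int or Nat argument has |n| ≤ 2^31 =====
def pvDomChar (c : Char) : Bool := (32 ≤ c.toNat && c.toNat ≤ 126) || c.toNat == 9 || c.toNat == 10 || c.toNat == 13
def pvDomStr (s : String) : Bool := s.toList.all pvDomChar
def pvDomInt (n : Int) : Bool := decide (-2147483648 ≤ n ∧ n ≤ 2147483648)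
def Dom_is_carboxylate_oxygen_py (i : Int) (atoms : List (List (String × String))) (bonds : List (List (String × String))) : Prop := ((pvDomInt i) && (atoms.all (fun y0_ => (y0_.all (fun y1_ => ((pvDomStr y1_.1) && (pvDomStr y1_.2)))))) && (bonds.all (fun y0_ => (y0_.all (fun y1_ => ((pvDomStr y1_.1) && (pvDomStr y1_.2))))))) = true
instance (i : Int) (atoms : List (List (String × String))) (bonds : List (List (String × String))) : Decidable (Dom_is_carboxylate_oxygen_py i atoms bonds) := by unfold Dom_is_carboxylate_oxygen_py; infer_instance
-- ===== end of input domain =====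

-- B drops A's per-atom adjacency structure: two direct scans of the bond list replace it.
-- Equivalence of the RETURN value is proved on Pre_ (well-formed molecule tables).

-- shared primitives (Python-semantics shorthands used by both ports and by Pre_)
-- atoms[j]["el"] (exact where atom j exists and carries "el"; Pre_ guarantees that wherever touched)
def pvEl (atoms : List (List (String × String))) (j : Int) : String :=
  (PySem.Dict.mk ((PySem.List.pyGet? atoms j).getD [])).getD "el" ""
-- int(b[k]) (exact where key k exists and parses; Pre_ guarantees that)
def pvB (b : List (String × String)) (k : String) : Int :=
  (PySem.Int.ofStr? ((PySem.Dict.mk b).getD k "")).getD 0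

-- ===== PORT A =====
-- nbrs[s].append(v)  (Python index semantics; no-op only outside Pre_)
def pvAppendAt (nbrs : List (List Int)) (s : Int) (v : Int) : List (List Int) :=
  PySem.List.pySetD nbrs s (PySem.List.pyGetD nbrs s [] ++ [v])

def pvMakeNbrs (atoms : List (List (String × String))) (bonds : List (List (String × String))) : List (List Int) :=
  bonds.foldl (fun nbrs b =>
    pvAppendAt (pvAppendAt nbrs (pvB b "a") (pvB b "b")) (pvB b "b") (pvB b "a"))
    (List.replicate atoms.length [])

def is_carboxylate_oxygen_py (i : Int) (atoms : List (List (String × String))) (bonds : List (List (String × String))) : Bool :=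
  if pvEl atoms i ≠ "O" then false
  else
    let nbrs := pvMakeNbrs atoms bonds
    let mine := PySem.List.pyGetD nbrs i []
    if mine.any (fun j => pvEl atoms j = "H") then false
    else
      let cnbrs := mine.filter (fun j => pvEl atoms j = "C")
      if cnbrs.length ≠ 1 then false
      else
        let c := PySem.List.pyGetD cnbrs 0 0
        let onbrs := (PySem.List.pyGetD nbrs c []).filter (fun j => pvEl atoms j = "O")
        decide (onbrs.length = 2)

-- ===== PORT B =====
def is_carboxylate_oxygen_py_alt (i : Int) (atoms : List (List (String × String))) (bonds : List (List (String × String))) : Bool :=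
  if pvEl atoms i ≠ "O" then false
  else
    let mine := bonds.foldl (fun acc b =>
      let a := pvB b "a"
      let c := pvB b "b"
      let acc1 := if a = i then acc ++ [c] else acc
      if c = i then acc1 ++ [a] else acc1) []
    if mine.any (fun j => pvEl atoms j = "H") then false
    else
      let cn := mine.filter (fun j => pvEl atoms j = "C")
      if cn.length ≠ 1 then false
      else
        let cc := PySem.List.pyGetD cn 0 0
        let oc := bonds.foldl (fun k b =>
          let a := pvB b "a"
          let c := pvB b "b"
          let k1 := if a = cc ∧ pvEl atoms c = "O" then k + 1 else k
          if c = cc ∧ pvEl atoms a = "O" then k1 + 1 else k1) (0 : Int)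
        decide (oc = 2)

-- ===== PRECONDITION & SPEC =====
-- atom v exists (Python index) and carries key "el"
def pvAtomEl (atoms : List (List (String × String))) (v : Int) : Bool :=
  match PySem.List.pyGet? atoms v with
  | none => false
  | some d => ((PySem.Dict.mk d).get? "el").isSome

-- atom v exists as a NONNEGATIVE in-range index and carries key "el"
def pvAtomOK (atoms : List (List (String × String))) (v : Int) : Bool :=
  decide (0 ≤ v) && pvAtomEl atoms v

-- bond b carries int-parsable "a" and "b" naming existing nonnegative atom indices with "el"
def pvBondOK (atoms : List (List (String × String))) (b : List (String × String)) : Bool :=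
  (((PySem.Dict.mk b).get? "a").bind PySem.Int.ofStr?).isSome &&
  (((PySem.Dict.mk b).get? "b").bind PySem.Int.ofStr?).isSome &&
  pvAtomOK atoms (pvB b "a") && pvAtomOK atoms (pvB b "b")

-- Pre_ = the natural domain of well-formed molecule tables: atom i exists and carries key "el",
-- and if it is an oxygen (only then does A touch indices and bonds) i is a nonnegative index and
-- every bond has int-parsable keys "a","b" naming nonnegative in-range atoms that carry "el".
-- It excludes malformed inputs on which A either raises (out-of-range index, missing key,
-- unparsable bond endpoint) or silently relies on Python's negative-index wraparound
-- (see cites for excluded inputs on which A returns).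
def Pre_is_carboxylate_oxygen_py (i : Int) (atoms : List (List (String × String))) (bonds : List (List (String × String))) : Prop :=
  pvAtomEl atoms i = true ∧
  (pvEl atoms i = "O" → 0 ≤ i ∧ ∀ b ∈ bonds, pvBondOK atoms b = true)
instance (i : Int) (atoms : List (List (String × String))) (bonds : List (List (String × String))) : Decidable (Pre_is_carboxylate_oxygen_py i atoms bonds) := by unfold Pre_is_carboxylate_oxygen_py; infer_instance

def pvWitness_is_carboxylate_oxygen_py : Int × (List (List (String × String))) × (List (List (String × String))) :=
  (0, [[("el", "O")], [("el", "C")], [("el", "O")]], [[("a", "0"), ("b", "1")], [("a", "1"), ("b", "2")]])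

def Spec_is_carboxylate_oxygen_py (i : Int) (atoms : List (List (String × String))) (bonds : List (List (String × String))) (out : Bool) : Prop := out = is_carboxylate_oxygen_py_alt i atoms bonds
instance (i : Int) (atoms : List (List (String × String))) (bonds : List (List (String × String))) (out : Bool) : Decidable (Spec_is_carboxylate_oxygen_py i atoms bonds out) := by unfold Spec_is_carboxylate_oxygen_py; infer_instance

-- ===== CLAIM (what is proved, stated in full; the proofs are below) =====
def Claim_equal_is_carboxylate_oxygen_py : Prop := ∀ (i : Int) (atoms : List (List (String × String))) (bonds : List (List (String × String))), Dom_is_carboxylate_oxygen_py i atoms bonds → Pre_is_carboxylate_oxygen_py i atoms bonds → Spec_is_carboxylate_oxygen_py i atoms bonds (is_carboxylate_oxygen_py i atoms bonds)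

-- ===== LEMMAS AND PROOFS =====

theorem pvAtomOK_range (atoms : List (List (String × String))) (v : Int)
    (h : pvAtomOK atoms v = true) : 0 ≤ v ∧ v < (atoms.length : Int) := by
  unfold pvAtomOK pvAtomEl at h
  simp only [Bool.and_eq_true, decide_eq_true_eq] at h
  obtain ⟨h0, h1⟩ := h
  refine ⟨h0, ?_⟩
  rcases hg : PySem.List.pyGet? atoms v with _ | d
  · rw [hg] at h1; simp at h1
  · have := PySem.List.mem_of_pyGet?_eq_some atoms hg  -- supplies nothing about range; use InRange instead
    by_contra hc
    have : ¬ PySem.Raise.InRange atoms.length v := by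
      unfold PySem.Raise.InRange; omega
    have h0' := (PySem.List.pyGet?_eq_none_iff atoms v).mpr this
    rw [h0'] at hg; cases hg

theorem pvIdx_nonneg (n : Nat) (k : Int) (h0 : 0 ≤ k) (h1 : k < (n : Int)) :
    PySem.List.pyIdx? n k = some k.toNat := by
  simp only [PySem.List.pyIdx?]
  split_ifs
  all_goals simp

theorem pvAppendAt_len (xs : List (List Int)) (s : Int) (v : Int) :
    (pvAppendAt xs s v).length = xs.length := PySem.List.length_pySetD _ _ _

theorem pvAppendAt_get (n : Nat) (xs : List (List Int)) (hlen : xs.length = n)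
    (s t v : Int) (hs0 : 0 ≤ s) (hsn : s < (n : Int)) (ht0 : 0 ≤ t) (htn : t < (n : Int)) :
    PySem.List.pyGetD (pvAppendAt xs s v) t [] =
      if s = t then PySem.List.pyGetD xs t [] ++ [v]
      else PySem.List.pyGetD xs t [] := by
  have hsi := pvIdx_nonneg n s hs0 hsn
  have hti := pvIdx_nonneg n t ht0 htn
  have hslt : s.toNat < xs.length := by omega
  have htlt : t.toNat < xs.length := by omega
  unfold pvAppendAt
  simp only [PySem.List.pySetD, PySem.List.pySet?, PySem.List.pyGetD, PySem.List.pyGet?, hlen,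
    hsi, hti, Option.map_some, Option.getD_some, Option.bind_some, List.length_set]
  rw [List.getElem?_set]
  by_cases hst : s = t
  · have heq : s.toNat = t.toNat := by omega
    simp [htlt, hst]
  · have hne : s.toNat ≠ t.toNat := by omega
    simp [hne, hst]

theorem pvBondOK_parts (atoms : List (List (String × String))) (b : List (String × String))
    (h : pvBondOK atoms b = true) :
    pvAtomOK atoms (pvB b "a") = true ∧ pvAtomOK atoms (pvB b "b") = true := by
  unfold pvBondOK at h
  simp only [Bool.and_eq_true] at h
  exact ⟨h.1.2, h.2⟩

-- the neighbour list of slot t after A's adjacency fold is B's one-pass collection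
theorem pvFoldA_get (atoms : List (List (String × String))) (t : Int)
    (ht0 : 0 ≤ t) (htn : t < (atoms.length : Int)) :
    ∀ (bonds : List (List (String × String))) (xs : List (List Int)),
      xs.length = atoms.length → (∀ b ∈ bonds, pvBondOK atoms b = true) →
      PySem.List.pyGetD
        (bonds.foldl (fun nbrs b =>
          pvAppendAt (pvAppendAt nbrs (pvB b "a") (pvB b "b")) (pvB b "b") (pvB b "a")) xs) t [] =
      bonds.foldl (fun acc b =>
        if pvB b "b" = t then
          (if pvB b "a" = t then acc ++ [pvB b "b"] else acc) ++ [pvB b "a"]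
        else
          (if pvB b "a" = t then acc ++ [pvB b "b"] else acc))
        (PySem.List.pyGetD xs t []) := by
  intro bonds
  induction bonds with
  | nil => intro xs _ _; rfl
  | cons b bs ih =>
    intro xs hlen hok
    have hb := hok b (by simp)
    obtain ⟨ha, hc⟩ := pvBondOK_parts atoms b hb
    obtain ⟨ha0, han⟩ := pvAtomOK_range atoms _ ha
    obtain ⟨hc0, hcn⟩ := pvAtomOK_range atoms _ hc
    have hlen1 : (pvAppendAt xs (pvB b "a") (pvB b "b")).length = atoms.length := by
      rw [pvAppendAt_len]; exact hlen
    have hlen2 : (pvAppendAt (pvAppendAt xs (pvB b "a") (pvB b "b")) (pvB b "b") (pvB b "a")).length = atoms.length := by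
      rw [pvAppendAt_len]; exact hlen1
    simp only [List.foldl_cons]
    rw [ih _ hlen2 (fun b' hb' => hok b' (by simp [hb']))]
    rw [pvAppendAt_get atoms.length _ hlen1 _ _ _ hc0 hcn ht0 htn,
        pvAppendAt_get atoms.length _ hlen _ _ _ ha0 han ht0 htn]

-- every element B collects is a bond endpoint of a well-formed bond (hence a valid atom)
theorem pvMem_fold (atoms : List (List (String × String))) (t : Int) :
    ∀ (bonds : List (List (String × String))) (acc : List Int),
      (∀ b ∈ bonds, pvBondOK atoms b = true) →
      ∀ x ∈ bonds.foldl (fun acc b =>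
          if pvB b "b" = t then
            (if pvB b "a" = t then acc ++ [pvB b "b"] else acc) ++ [pvB b "a"]
          else
            (if pvB b "a" = t then acc ++ [pvB b "b"] else acc)) acc,
        x ∈ acc ∨ pvAtomOK atoms x = true := by
  intro bonds
  induction bonds with
  | nil => intro acc _ x hx; exact Or.inl hx
  | cons b bs ih =>
    intro acc hok x hx
    have hb := hok b (by simp)
    obtain ⟨ha, hc⟩ := pvBondOK_parts atoms b hb
    simp only [List.foldl_cons] at hx
    have hok' : ∀ b' ∈ bs, pvBondOK atoms b' = true := fun b' hb' => hok b' (List.mem_cons_of_mem _ hb')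
    rcases ih _ hok' x hx with h | h
    · have hstep : x ∈ acc ∨ x = pvB b "a" ∨ x = pvB b "b" := by
        split_ifs at h with hcb hca hca
        · rcases List.mem_append.mp h with h' | h'
          · rcases List.mem_append.mp h' with h'' | h''
            · exact Or.inl h''
            · exact Or.inr (Or.inr (List.mem_singleton.mp h''))
          · exact Or.inr (Or.inl (List.mem_singleton.mp h'))
        · rcases List.mem_append.mp h with h' | h'
          · exact Or.inl h'
          · exact Or.inr (Or.inl (List.mem_singleton.mp h'))
        · rcases List.mem_append.mp h with h' | h'
          · exact Or.inl h'
          · exact Or.inr (Or.inr (List.mem_singleton.mp h'))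
        · exact Or.inl h
      rcases hstep with h' | h' | h'
      · exact Or.inl h'
      · exact Or.inr (h' ▸ ha)
      · exact Or.inr (h' ▸ hc)
    · exact Or.inr h

-- the collecting pass is append-homomorphic in its accumulator
theorem pvFoldApp_acc (cc : Int) :
    ∀ (bonds : List (List (String × String))) (acc : List Int),
      bonds.foldl (fun acc b =>
        if pvB b "b" = cc then
          (if pvB b "a" = cc then acc ++ [pvB b "b"] else acc) ++ [pvB b "a"]
        else
          (if pvB b "a" = cc then acc ++ [pvB b "b"] else acc)) acc =
      acc ++ bonds.foldl (fun acc b =>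
        if pvB b "b" = cc then
          (if pvB b "a" = cc then acc ++ [pvB b "b"] else acc) ++ [pvB b "a"]
        else
          (if pvB b "a" = cc then acc ++ [pvB b "b"] else acc)) [] := by
  intro bonds
  induction bonds with
  | nil => intro acc; simp
  | cons b bs ih =>
    intro acc
    simp only [List.foldl_cons]
    rw [ih, ih (if pvB b "b" = cc then
          (if pvB b "a" = cc then ([] : List Int) ++ [pvB b "b"] else []) ++ [pvB b "a"]
        else
          (if pvB b "a" = cc then ([] : List Int) ++ [pvB b "b"] else []))]
    split_ifs <;> simp

-- B's counting pass is the length of the oxygen filter of the collecting pass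
theorem pvFoldC_eq (atoms : List (List (String × String))) (cc : Int) :
    ∀ (bonds : List (List (String × String))) (k : Int),
      bonds.foldl (fun k b =>
        if pvB b "b" = cc ∧ pvEl atoms (pvB b "a") = "O" then
          (if pvB b "a" = cc ∧ pvEl atoms (pvB b "b") = "O" then k + 1 else k) + 1
        else
          (if pvB b "a" = cc ∧ pvEl atoms (pvB b "b") = "O" then k + 1 else k)) k =
      k + (((bonds.foldl (fun acc b =>
        if pvB b "b" = cc then
          (if pvB b "a" = cc then acc ++ [pvB b "b"] else acc) ++ [pvB b "a"]
        else
          (if pvB b "a" = cc then acc ++ [pvB b "b"] else acc)) []).filter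
          (fun j => pvEl atoms j = "O")).length : Int) := by
  intro bonds
  induction bonds with
  | nil => intro k; simp
  | cons b bs ih =>
    intro k
    simp only [List.foldl_cons]
    rw [ih, pvFoldApp_acc cc bs (if pvB b "b" = cc then
          (if pvB b "a" = cc then ([] : List Int) ++ [pvB b "b"] else []) ++ [pvB b "a"]
        else
          (if pvB b "a" = cc then ([] : List Int) ++ [pvB b "b"] else []))]
    split_ifs with h1 h2 h2 <;>
      simp_all [List.filter] <;> omega

-- ===== VERDICT (by name: the statement is the Claim_ definition above) =====
theorem is_carboxylate_oxygen_py_spec : Claim_equal_is_carboxylate_oxygen_py := by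
  intro i atoms bonds _ hpre
  obtain ⟨hai, hbonds⟩ := hpre
  unfold Spec_is_carboxylate_oxygen_py
  simp only [is_carboxylate_oxygen_py, is_carboxylate_oxygen_py_alt]
  by_cases hO : pvEl atoms i = "O"
  · obtain ⟨hi0, hok⟩ := hbonds hO
    have hin : i < (atoms.length : Int) := by
      unfold pvAtomEl at hai
      rcases hg : PySem.List.pyGet? atoms i with _ | d
      · rw [hg] at hai; simp at hai
      · by_contra hc
        have : ¬ PySem.Raise.InRange atoms.length i := by
          unfold PySem.Raise.InRange; omega
        have h0' := (PySem.List.pyGet?_eq_none_iff atoms i).mpr this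
        rw [h0'] at hg; cases hg
    have hmine : PySem.List.pyGetD (pvMakeNbrs atoms bonds) i [] =
        bonds.foldl (fun acc b =>
          if pvB b "b" = i then
            (if pvB b "a" = i then acc ++ [pvB b "b"] else acc) ++ [pvB b "a"]
          else
            (if pvB b "a" = i then acc ++ [pvB b "b"] else acc)) [] := by
      unfold pvMakeNbrs
      rw [pvFoldA_get atoms i hi0 hin bonds (List.replicate atoms.length []) (by simp) hok]
      congr 1
      unfold PySem.List.pyGetD
      rcases hg : PySem.List.pyGet? (List.replicate atoms.length ([] : List Int)) i with _ | x
      · rfl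
      · have := PySem.List.mem_of_pyGet?_eq_some _ hg
        simp [List.eq_of_mem_replicate this]
    simp only [if_neg (show ¬(pvEl atoms i ≠ "O") by simp [hO])]
    rw [hmine]
    split_ifs with hH hlen
    · rfl
    · rfl
    · rcases hfc : (bonds.foldl (fun acc b =>
          if pvB b "b" = i then
            (if pvB b "a" = i then acc ++ [pvB b "b"] else acc) ++ [pvB b "a"]
          else
            (if pvB b "a" = i then acc ++ [pvB b "b"] else acc)) []).filter
            (fun j => pvEl atoms j = "C") with _ | ⟨c0, rest⟩
      · rw [hfc] at hlen; simp at hlen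
      · rw [hfc] at hlen
        have hrest : rest = [] := by simpa using hlen
        subst hrest
        simp only [PySem.List.pyGetD_zero_cons]
        have hc0mem : c0 ∈ bonds.foldl (fun acc b =>
            if pvB b "b" = i then
              (if pvB b "a" = i then acc ++ [pvB b "b"] else acc) ++ [pvB b "a"]
            else
              (if pvB b "a" = i then acc ++ [pvB b "b"] else acc)) [] := by
          have : c0 ∈ (bonds.foldl (fun acc b =>
            if pvB b "b" = i then
              (if pvB b "a" = i then acc ++ [pvB b "b"] else acc) ++ [pvB b "a"]
            else
              (if pvB b "a" = i then acc ++ [pvB b "b"] else acc)) []).filter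
              (fun j => pvEl atoms j = "C") := by rw [hfc]; simp
          exact List.mem_of_mem_filter this
        have hcok : pvAtomOK atoms c0 = true := by
          rcases pvMem_fold atoms i bonds [] hok c0 hc0mem with h | h
          · simp at h
          · exact h
        obtain ⟨hc00, hc0n⟩ := pvAtomOK_range atoms c0 hcok
        have honbrs : PySem.List.pyGetD (pvMakeNbrs atoms bonds) c0 [] =
            bonds.foldl (fun acc b =>
              if pvB b "b" = c0 then
                (if pvB b "a" = c0 then acc ++ [pvB b "b"] else acc) ++ [pvB b "a"]
              else
                (if pvB b "a" = c0 then acc ++ [pvB b "b"] else acc)) [] := by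
          unfold pvMakeNbrs
          rw [pvFoldA_get atoms c0 hc00 hc0n bonds (List.replicate atoms.length []) (by simp) hok]
          congr 1
          unfold PySem.List.pyGetD
          rcases hg : PySem.List.pyGet? (List.replicate atoms.length ([] : List Int)) c0 with _ | x
          · rfl
          · have := PySem.List.mem_of_pyGet?_eq_some _ hg
            simp [List.eq_of_mem_replicate this]
        rw [honbrs, pvFoldC_eq atoms c0 bonds 0]
        simp only [decide_eq_decide]
        omega
  · simp only [if_pos (show (pvEl atoms i ≠ "O") from hO)]
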